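-- pv_equiv track=rewrite | github.com/Mithil097/20176097_cspp1 | file as text.py | spl
-- ===== SOURCE A (Python) =====
-- def spl(s):
--     s=s.lower()
--     sk=""
--     for i in s:
--         if 97<=ord(i)<=122 or 47<=ord(i)<=56 or ord(i)==98:
--            sk=sk+i
-- #s=s.replace("."," ").replace(","," ").replace("\n"," ").replace("("," ").replace(")"," ").replace("["," ").replace("]"," ")
--         else:
--             sk=sk+" "
--     sk=sk.split(" ")
--     return sk
-- ===== SOURCE B (Python) =====
-- def spl(s):
--     res = []
--     cur = []
--     for c in s.lower():
--         o = ord(c)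
--         if 97 <= o <= 122 or 47 <= o <= 56:
--             cur.append(c)
--         else:
--             res.append("".join(cur))
--             cur = []
--     res.append("".join(cur))
--     return res
-- ===== Notes on version B (the rewrite author's own statement) =====
-- stated objective: alternative
-- what changed: Single pass maintaining a current-word buffer and a result list, emitting words directly, instead of building a filtered copy by repeated string concatenation and then calling str.split.
import Mathlib
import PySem

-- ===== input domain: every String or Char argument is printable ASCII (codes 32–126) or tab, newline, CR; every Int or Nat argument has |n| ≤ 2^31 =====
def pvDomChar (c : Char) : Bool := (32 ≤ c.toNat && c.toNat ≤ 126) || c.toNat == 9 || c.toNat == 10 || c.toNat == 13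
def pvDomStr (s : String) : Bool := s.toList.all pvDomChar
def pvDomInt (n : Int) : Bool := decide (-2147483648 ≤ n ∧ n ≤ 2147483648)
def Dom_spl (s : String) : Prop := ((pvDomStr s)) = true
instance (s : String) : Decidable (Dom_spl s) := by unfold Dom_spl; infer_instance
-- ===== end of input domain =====

-- B: one pass keeping a current-word buffer and a result list, instead of A's
-- filtered-copy-then-split (alternative decomposition, same cost).

-- ===== PORT A =====
def spl (s : String) : List String :=
  let ls := (PySem.Str.lower s).toList
  let sk : List Char := ls.foldl (fun sk c =>
    if (97 ≤ c.toNat ∧ c.toNat ≤ 122) ∨ (47 ≤ c.toNat ∧ c.toNat ≤ 56) ∨ c.toNat = 98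
    then sk ++ [c] else sk ++ [' ']) []
  (PySem.Chars.splitOn sk [' ']).map String.ofList

-- ===== PORT B =====
def spl_alt (s : String) : List String :=
  let r := (PySem.Str.lower s).toList.foldl
    (fun (p : List String × List Char) c =>
      if (97 ≤ c.toNat ∧ c.toNat ≤ 122) ∨ (47 ≤ c.toNat ∧ c.toNat ≤ 56)
      then (p.1, p.2 ++ [c]) else (p.1 ++ [String.ofList p.2], []))
    ([], [])
  r.1 ++ [String.ofList r.2]

-- ===== PRECONDITION & SPEC =====
def Spec_spl (s : String) (out : List String) : Prop := out = spl_alt s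
instance (s : String) (out : List String) : Decidable (Spec_spl s out) := by unfold Spec_spl; infer_instance

-- ===== CLAIM (what is proved, stated in full; the proofs are below) =====
def Claim_equal_spl : Prop := ∀ (s : String), Dom_spl s → Spec_spl s (spl s)

-- ===== LEMMAS AND PROOFS =====

/-- Specification of splitting a char list on a single space. -/
def splitSp : List Char → List (List Char)
  | [] => [[]]
  | c :: rest =>
    if c = ' ' then [] :: splitSp rest
    else match splitSp rest with
      | [] => [[c]]
      | w :: ws => (c :: w) :: ws

/-- Prepend a prefix onto the head word of a split result. -/
def consHead (p : List Char) : List (List Char) → List (List Char)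
  | [] => [p]
  | w :: ws => (p ++ w) :: ws

theorem splitSp_ne_nil (l : List Char) : splitSp l ≠ [] := by
  cases l with
  | nil => simp [splitSp]
  | cons c rest =>
    simp only [splitSp]
    split
    · simp
    · split <;> simp_all

theorem consHead_nil_of_ne (ws : List (List Char)) (h : ws ≠ []) : consHead [] ws = ws := by
  cases ws with
  | nil => exact absurd rfl h
  | cons w ws => simp [consHead]

theorem go_eq (fuel : Nat) : ∀ (l cur : List Char) (accs : List (List Char)),
    l.length < fuel →
    PySem.Chars.splitOn.go [' '] fuel l cur accs =
      accs.reverse ++ consHead cur.reverse (splitSp l) := by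
  induction fuel with
  | zero => intro l cur accs hl; omega
  | succ fuel ih =>
    intro l cur accs hl
    cases l with
    | nil =>
      rw [PySem.Chars.splitOn.go]
      · simp [splitSp, consHead]
      · omega
    | cons c rest =>
      rw [PySem.Chars.splitOn.go]
      simp only [List.length_cons] at hl
      by_cases hc : c = ' '
      · rw [if_pos (by subst hc; simp [List.isPrefixOf])]
        have hrw := ih (List.drop [' '].length (c :: rest)) [] (cur.reverse :: accs)
          (by simp; omega)
        rw [hrw]
        simp only [List.reverse_nil, List.drop_succ_cons, List.length_cons, List.length_nil,
          List.drop_zero]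
        rw [consHead_nil_of_ne _ (splitSp_ne_nil _)]
        simp [splitSp, hc, consHead]
      · rw [if_neg (by simp [List.isPrefixOf]; intro h; exact hc h.symm)]
        rw [ih rest (c :: cur) accs (Nat.lt_of_succ_lt_succ hl)]
        simp only [splitSp, if_neg hc]
        rcases hws : splitSp rest with _ | ⟨w, ws⟩
        · exact absurd hws (splitSp_ne_nil rest)
        · simp [consHead]

theorem splitOn_space_eq (l : List Char) :
    PySem.Chars.splitOn l [' '] = splitSp l := by
  unfold PySem.Chars.splitOn
  rw [go_eq (l.length + 1) l [] [] (by omega)]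
  simpa using consHead_nil_of_ne _ (splitSp_ne_nil l)

/-- The char a position of A's filtered copy carries. -/
def fmap (c : Char) : Char :=
  if (97 ≤ c.toNat ∧ c.toNat ≤ 122) ∨ (47 ≤ c.toNat ∧ c.toNat ≤ 56) ∨ c.toNat = 98
  then c else ' '

theorem spl_eq_splitSp (s : String) :
    spl s = (splitSp (((PySem.Str.lower s).toList).map fmap)).map String.ofList := by
  show (List.map String.ofList (PySem.Chars.splitOn
      (((PySem.Str.lower s).toList).foldl (fun sk c =>
        if (97 ≤ c.toNat ∧ c.toNat ≤ 122) ∨ (47 ≤ c.toNat ∧ c.toNat ≤ 56) ∨ c.toNat = 98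
        then sk ++ [c] else sk ++ [' ']) []) [' '])) = _
  have h : ((PySem.Str.lower s).toList).foldl (fun sk c =>
      if (97 ≤ c.toNat ∧ c.toNat ≤ 122) ∨ (47 ≤ c.toNat ∧ c.toNat ≤ 56) ∨ c.toNat = 98
      then sk ++ [c] else sk ++ [' ']) [] = ((PySem.Str.lower s).toList).map fmap := by
    have : (fun (sk : List Char) (c : Char) =>
        if (97 ≤ c.toNat ∧ c.toNat ≤ 122) ∨ (47 ≤ c.toNat ∧ c.toNat ≤ 56) ∨ c.toNat = 98
        then sk ++ [c] else sk ++ [' ']) = (fun sk c => sk ++ [fmap c]) := by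
      funext sk c; unfold fmap; split <;> rfl
    rw [this, PySem.List.foldl_append_singleton_eq_map]
    simp
  rw [h, splitOn_space_eq]

theorem keep_ne_space (c : Char)
    (h : (97 ≤ c.toNat ∧ c.toNat ≤ 122) ∨ (47 ≤ c.toNat ∧ c.toNat ≤ 56)) : fmap c ≠ ' ' := by
  unfold fmap
  rw [if_pos (Or.elim h Or.inl (fun h2 => Or.inr (Or.inl h2)))]
  intro he
  have : c.toNat = 32 := by rw [he]; rfl
  omega

theorem not_keep_space (c : Char)
    (h : ¬ ((97 ≤ c.toNat ∧ c.toNat ≤ 122) ∨ (47 ≤ c.toNat ∧ c.toNat ≤ 56))) : fmap c = ' ' := by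
  unfold fmap
  rw [if_neg]
  intro hk
  rcases hk with h1 | h1 | h1
  · exact h (Or.inl h1)
  · exact h (Or.inr h1)
  · exact h (Or.inl ⟨by omega, by omega⟩)

theorem alt_fold_eq (cs : List Char) : ∀ (res : List String) (cur : List Char),
    (let r := cs.foldl
      (fun (p : List String × List Char) c =>
        if (97 ≤ c.toNat ∧ c.toNat ≤ 122) ∨ (47 ≤ c.toNat ∧ c.toNat ≤ 56)
        then (p.1, p.2 ++ [c]) else (p.1 ++ [String.ofList p.2], []))
      (res, cur)
     r.1 ++ [String.ofList r.2]) =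
    res ++ (consHead cur (splitSp (cs.map fmap))).map String.ofList := by
  induction cs with
  | nil => intro res cur; simp [splitSp, consHead]
  | cons c cs ih =>
    intro res cur
    simp only [List.foldl_cons, List.map_cons]
    by_cases hc : (97 ≤ c.toNat ∧ c.toNat ≤ 122) ∨ (47 ≤ c.toNat ∧ c.toNat ≤ 56)
    · rw [if_pos hc]
      rw [ih res (cur ++ [c])]
      have hne := keep_ne_space c hc
      have hcv : fmap c = c := by
        unfold fmap
        rw [if_pos (Or.elim hc Or.inl (fun h2 => Or.inr (Or.inl h2)))]
      rw [hcv]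
      have hc' : c ≠ ' ' := by rw [← hcv]; exact hne
      simp only [splitSp, if_neg hc']
      rcases hws : splitSp (cs.map fmap) with _ | ⟨w, ws⟩
      · exact absurd hws (splitSp_ne_nil _)
      · simp [consHead]
    · rw [if_neg hc]
      rw [ih (res ++ [String.ofList cur]) []]
      rw [not_keep_space c hc]
      simp only [splitSp]
      rw [consHead_nil_of_ne _ (splitSp_ne_nil _)]
      simp [consHead]

-- ===== VERDICT (by name: the statement is the Claim_ definition above) =====
theorem spl_spec : Claim_equal_spl := by
  intro s _
  unfold Spec_spl spl_alt
  rw [spl_eq_splitSp]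
  rw [alt_fold_eq ((PySem.Str.lower s).toList) [] []]
  rw [consHead_nil_of_ne _ (splitSp_ne_nil _)]
  simp
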